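-- pv_equiv track=rewrite | github.com/GitMaster9/BibleVerse | modules/Bible.py | extract_book_v2
-- ===== SOURCE A (Python) =====
-- def extract_book_v2(lines):
--     book = [[]]
--     chapters = []
--     chapter = 0
--     verse = 0
--     digits = 0
--     text = ""
--     number_as_string = ""
--
--     for line in lines:
--         for i in range(len(line)):
--             if line[i].isdigit():
--                 if digits == 0:
--                     number_as_string = ""
--
--                 number_as_string += line[i]
--                 digits += 1
--             else:
--                 if digits > 0:
--                     chapters.append(text)
--
--                     text = ""
--
--                     number_as_int = int(number_as_string)
--                     if (number_as_int - chapter) == 1: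
--                         verse += 1
--                     else:
--                         book.append(chapters)
--                         chapters = []
--                         chapter += 1
--                         verse = 1
--
--                     text += number_as_string
--
--                     digits = 0
--
--                 text += line[i]
--
--     chapters.append(text)
--     book.append(chapters)
--
--     return book
-- ===== SOURCE B (Python) =====
-- import re
--
-- def extract_book_v2(lines):
--     # Tokenize the joined text into maximal digit/non-digit runs and do one
--     # pass over tokens instead of A's per-character digit-accumulation machine.
--     s = "".join(lines)
--     tokens = re.findall(r'\d+|\D+', s)
--     # A never flushes a digit run that ends the input, so drop a trailing digit token.
--     if tokens and tokens[-1].isdigit():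
--         tokens.pop()
--     book = [[]]
--     chapters = []
--     chapter = 0
--     verse = 0
--     text = ""
--     for tok in tokens:
--         if tok[0].isdigit():
--             chapters.append(text)
--             if int(tok) - chapter == 1:
--                 verse += 1
--             else:
--                 book.append(chapters)
--                 chapters = []
--                 chapter += 1
--                 verse = 1
--             text = tok
--         else:
--             text += tok
--     chapters.append(text)
--     book.append(chapters)
--     return book
-- ===== Notes on version B (the rewrite author's own statement) =====
-- stated objective: alternative
-- what changed: A's per-character state machine (digit accumulator, deferred flush flags) is replaced by joining the lines, regex-tokenizing into maximal digit/non-digit runs, popping an unflushed trailing digit token, and folding once over tokens.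
import Mathlib
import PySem

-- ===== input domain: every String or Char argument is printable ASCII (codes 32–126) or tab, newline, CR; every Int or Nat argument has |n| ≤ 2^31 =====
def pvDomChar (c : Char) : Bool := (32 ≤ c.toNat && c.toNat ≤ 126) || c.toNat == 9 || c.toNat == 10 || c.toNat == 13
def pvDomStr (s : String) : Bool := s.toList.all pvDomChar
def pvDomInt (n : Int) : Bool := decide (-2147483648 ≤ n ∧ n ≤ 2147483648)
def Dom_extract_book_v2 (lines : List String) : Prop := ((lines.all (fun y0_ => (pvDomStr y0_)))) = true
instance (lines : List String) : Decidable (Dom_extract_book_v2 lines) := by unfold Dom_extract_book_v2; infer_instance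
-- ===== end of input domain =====

-- B replaces A's per-character digit-accumulation state machine by a single fold
-- over the maximal digit/non-digit tokens of the joined text (objective: alternative).

-- ===== PORT A =====
-- state of A's loop: (book, chapters, chapter, verse, digits, text, number_as_string)
structure PvStA where
  book : List (List String)
  chapters : List String
  chapter : Int
  verse : Int
  digits : Int
  text : List Char
  num : List Char
deriving Repr, DecidableEq

-- body of A's inner loop over the characters of a line (line[i] for i in range(len(line)))
def pvStepA (st : PvStA) (c : Char) : PvStA :=
  if PySem.Chars.isdigit c then
    { st with num := (if st.digits = 0 then [] else st.num) ++ [c],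
              digits := st.digits + 1 }
  else
    if st.digits > 0 then
      let chapters' := st.chapters ++ [String.ofList st.text]
      -- int(number_as_string): num is a nonempty digit run whenever digits > 0, so ofStr? succeeds; the getD default is never used
      let n := (PySem.Int.ofStr? (String.ofList st.num)).getD 0
      if n - st.chapter = 1 then
        { st with chapters := chapters', verse := st.verse + 1,
                  text := st.num ++ [c], digits := 0 }
      else
        { st with book := st.book ++ [chapters'], chapters := [],
                  chapter := st.chapter + 1, verse := 1,
                  text := st.num ++ [c], digits := 0 }
    else
      { st with text := st.text ++ [c] }

def extract_book_v2 (lines : List String) : List (List String) :=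
  let st := lines.foldl (fun st line => line.toList.foldl pvStepA st)
      { book := [[]], chapters := [], chapter := 0, verse := 0, digits := 0, text := [], num := [] }
  st.book ++ [st.chapters ++ [String.ofList st.text]]

-- ===== PORT B =====
-- state of B's token loop: (book, chapters, chapter, verse, text)
structure PvStB where
  book : List (List String)
  chapters : List String
  chapter : Int
  verse : Int
  text : List Char
deriving Repr, DecidableEq

-- re.findall(r'\d+|\D+', s): the maximal runs of digits / of non-digits
def pvTokenize (l : List Char) : List (List Char) :=
  match l with
  | [] => []
  | c :: cs =>
      (c :: cs.takeWhile (fun x => PySem.Chars.isdigit x == PySem.Chars.isdigit c))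
        :: pvTokenize (cs.dropWhile (fun x => PySem.Chars.isdigit x == PySem.Chars.isdigit c))
termination_by l.length
decreasing_by
  simp only [List.length_cons]
  exact Nat.lt_succ_of_le (List.Sublist.length_le (List.dropWhile_sublist _))

-- if tokens and tokens[-1].isdigit(): tokens.pop()
def pvStripTrail (ts : List (List Char)) : List (List Char) :=
  if (ts.getLast?).elim false (fun t => !t.isEmpty && t.all PySem.Chars.isdigit) then
    ts.dropLast
  else ts

-- body of B's loop over tokens (tokens are nonempty by construction, so head? is always some)
def pvStepB (st : PvStB) (tok : List Char) : PvStB :=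
  if (tok.head?).elim false PySem.Chars.isdigit then
    let chapters' := st.chapters ++ [String.ofList st.text]
    let n := (PySem.Int.ofStr? (String.ofList tok)).getD 0
    if n - st.chapter = 1 then
      { st with chapters := chapters', verse := st.verse + 1, text := tok }
    else
      { st with book := st.book ++ [chapters'], chapters := [],
                chapter := st.chapter + 1, verse := 1, text := tok }
  else
    { st with text := st.text ++ tok }

def extract_book_v2_alt (lines : List String) : List (List String) :=
  let s := lines.flatMap String.toList
  let toks := pvStripTrail (pvTokenize s)
  let st := toks.foldl pvStepB
      { book := [[]], chapters := [], chapter := 0, verse := 0, text := [] }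
  st.book ++ [st.chapters ++ [String.ofList st.text]]

-- ===== PRECONDITION & SPEC =====
def Spec_extract_book_v2 (lines : List String) (out : List (List String)) : Prop := out = extract_book_v2_alt lines
instance (lines : List String) (out : List (List String)) : Decidable (Spec_extract_book_v2 lines out) := by unfold Spec_extract_book_v2; infer_instance

-- ===== CLAIM (what is proved, stated in full; the proofs are below) =====
def Claim_equal_extract_book_v2 : Prop := ∀ (lines : List String), Dom_extract_book_v2 lines → Spec_extract_book_v2 lines (extract_book_v2 lines)

-- ===== LEMMAS AND PROOFS =====

-- projection of A's state onto B's (A's digits/num are pending bookkeeping only)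
def pvProj (st : PvStA) : PvStB :=
  { book := st.book, chapters := st.chapters, chapter := st.chapter,
    verse := st.verse, text := st.text }

theorem pvTokenize_nil : pvTokenize [] = [] := by rw [pvTokenize]

-- a digit run extends the pending number when digits > 0
theorem pv_run_pos (d : List Char) : ∀ (st : PvStA), (∀ c ∈ d, PySem.Chars.isdigit c = true) → 0 < st.digits →
    d.foldl pvStepA st = { st with digits := st.digits + d.length, num := st.num ++ d } := by
  induction d with
  | nil => intro st _ _; simp
  | cons c d ih =>
    intro st hall hpos
    have hc := hall c (List.mem_cons_self ..)
    have hstep : pvStepA st c = { st with num := st.num ++ [c], digits := st.digits + 1 } := by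
      simp only [pvStepA, hc, if_true]
      have : ¬ st.digits = 0 := by omega
      simp [this]
    simp only [List.foldl_cons, hstep]
    rw [ih _ (fun x hx => hall x (List.mem_cons_of_mem _ hx)) (by simp; omega)]
    simp only [List.length_cons]
    congr 1 <;> first | (push_cast; ring) | simp

-- starting from digits = 0, a digit run c :: d leaves only a pending number behind
theorem pv_run_zero (c : Char) (d : List Char) (st : PvStA)
    (hc : PySem.Chars.isdigit c = true) (hall : ∀ x ∈ d, PySem.Chars.isdigit x = true)
    (h0 : st.digits = 0) :
    (c :: d).foldl pvStepA st = { st with digits := 1 + (d.length : Int), num := c :: d } := by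
  have hstep : pvStepA st c = { st with num := [c], digits := st.digits + 1 } := by
    simp [pvStepA, hc, h0]
  simp only [List.foldl_cons, hstep]
  rw [pv_run_pos d _ hall (by simp [h0])]
  simp [h0]

-- flushing a pending number on a non-digit character is B's digit-token step plus the character
theorem pv_flush (st : PvStA) (c : Char) (sb : PvStB) (hsb : sb = pvStepB (pvProj st) st.num)
    (hd : 0 < st.digits) (hc : PySem.Chars.isdigit c = false)
    (hnum : (st.num.head?).elim false PySem.Chars.isdigit = true) :
    pvProj (pvStepA st c) = { sb with text := sb.text ++ [c] } ∧
    (pvStepA st c).digits = 0 := by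
  subst hsb
  have hd' : st.digits > 0 := hd
  constructor <;>
    · simp only [pvStepA, pvStepB, pvProj, hc, Bool.false_eq_true, if_false, hd', if_true, hnum]
      split <;> simp

-- the defining equation of pvTokenize on a cons
theorem pvTokenize_cons (c : Char) (cs : List Char) :
    pvTokenize (c :: cs) =
      (c :: cs.takeWhile (fun x => PySem.Chars.isdigit x == PySem.Chars.isdigit c))
        :: pvTokenize (cs.dropWhile (fun x => PySem.Chars.isdigit x == PySem.Chars.isdigit c)) := by
  rw [pvTokenize]

theorem pvTokenize_ne_nil (c : Char) (cs : List Char) : pvTokenize (c :: cs) ≠ [] := by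
  rw [pvTokenize_cons]; simp

theorem pvStripTrail_nil : pvStripTrail [] = [] := rfl

theorem pvStripTrail_cons (t : List Char) (T : List (List Char)) (hT : T ≠ []) :
    pvStripTrail (t :: T) = t :: pvStripTrail T := by
  unfold pvStripTrail
  rw [show (t :: T).getLast? = T.getLast? from by
        cases T with | nil => exact absurd rfl hT | cons a T' => simp,
      List.dropLast_cons_of_ne_nil hT]
  split <;> rfl

-- a token whose head is a non-digit survives pvStripTrail as a singleton
theorem pvStripTrail_single_nondigit (c : Char) (w : List Char) (hc : PySem.Chars.isdigit c = false) :
    pvStripTrail [c :: w] = [c :: w] := by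
  unfold pvStripTrail
  simp [hc]

-- a nonempty all-digit final token is popped
theorem pvStripTrail_single_digit (c : Char) (w : List Char) (hc : PySem.Chars.isdigit c = true)
    (hw : ∀ x ∈ w, PySem.Chars.isdigit x = true) :
    pvStripTrail [c :: w] = [] := by
  unfold pvStripTrail
  simp [hc]
  exact hw

-- prepending one non-digit character to the text is absorbed by the token fold
theorem pv_T1 (c : Char) (hc : PySem.Chars.isdigit c = false) (s' : List Char) (sb : PvStB) :
    (pvStripTrail (pvTokenize (c :: s'))).foldl pvStepB sb =
      (pvStripTrail (pvTokenize s')).foldl pvStepB { sb with text := sb.text ++ [c] } := by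
  cases s' with
  | nil =>
    rw [pvTokenize_cons]
    simp [pvTokenize_nil, pvStripTrail_nil, pvStripTrail_single_nondigit c _ hc, pvStepB, hc]
  | cons x u =>
    rw [pvTokenize_cons]
    by_cases hx : PySem.Chars.isdigit x = true
    · have htw : (x :: u).takeWhile (fun y => PySem.Chars.isdigit y == PySem.Chars.isdigit c) = [] := by
        rw [List.takeWhile_cons_of_neg]; simp [hx, hc]
      have hdw : (x :: u).dropWhile (fun y => PySem.Chars.isdigit y == PySem.Chars.isdigit c) = x :: u := by
        rw [List.dropWhile_cons_of_neg]; simp [hx, hc]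
      rw [htw, hdw, pvStripTrail_cons _ _ (pvTokenize_ne_nil x u)]
      simp [pvStepB, hc]
    · have hxf : PySem.Chars.isdigit x = false := by simpa using hx
      have hpred : (fun y => PySem.Chars.isdigit y == PySem.Chars.isdigit c)
          = (fun y => PySem.Chars.isdigit y == PySem.Chars.isdigit x) := by
        funext y; rw [hc, hxf]
      rw [hpred, List.takeWhile_cons_of_pos (by simp [hxf]), List.dropWhile_cons_of_pos (by simp [hxf]),
          pvTokenize_cons x u]
      cases hz : pvTokenize (u.dropWhile (fun y => PySem.Chars.isdigit y == PySem.Chars.isdigit x)) with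
      | nil =>
        rw [pvStripTrail_single_nondigit c _ hc, pvStripTrail_single_nondigit x _ hxf]
        simp [pvStepB, hc, hxf]
      | cons a T =>
        rw [pvStripTrail_cons (c :: x :: u.takeWhile (fun y => PySem.Chars.isdigit y == PySem.Chars.isdigit x)) (a :: T) (by simp)]
        conv_rhs => rw [pvStripTrail_cons (x :: u.takeWhile (fun y => PySem.Chars.isdigit y == PySem.Chars.isdigit x)) (a :: T) (by simp)]
        simp only [List.foldl_cons]
        congr 1
        simp [pvStepB, hc, hxf]

-- main invariant: from a no-pending-digits state, A's character machine projects to B's token fold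
theorem pv_main : ∀ (n : ℕ) (s : List Char), s.length ≤ n → ∀ (st : PvStA), st.digits = 0 →
    pvProj (s.foldl pvStepA st) = (pvStripTrail (pvTokenize s)).foldl pvStepB (pvProj st) := by
  intro n
  induction n with
  | zero =>
    intro s hs st _
    cases s with
    | nil => simp [pvTokenize_nil, pvStripTrail_nil]
    | cons c s' => simp at hs
  | succ n ih =>
    intro s hs st h0
    cases s with
    | nil => simp [pvTokenize_nil, pvStripTrail_nil]
    | cons c s' =>
      by_cases hc : PySem.Chars.isdigit c = true
      · -- a maximal digit run starts here
        have hpred : (fun y => PySem.Chars.isdigit y == PySem.Chars.isdigit c)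
            = (fun y => PySem.Chars.isdigit y) := by
          funext y; rw [hc]; cases PySem.Chars.isdigit y <;> rfl
        rw [pvTokenize_cons, hpred]
        set tw := s'.takeWhile (fun y => PySem.Chars.isdigit y) with htw
        set dw := s'.dropWhile (fun y => PySem.Chars.isdigit y) with hdwdef
        have hsplit : s' = tw ++ dw := (List.takeWhile_append_dropWhile).symm
        have hall : ∀ x ∈ tw, PySem.Chars.isdigit x = true :=
          fun x hx => List.mem_takeWhile_imp hx
        have hrun := pv_run_zero c tw st hc hall h0
        have hsplit2 : c :: s' = (c :: tw) ++ dw := by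
          rw [List.cons_append, ← hsplit]
        conv_lhs => rw [hsplit2]
        rw [List.foldl_append, hrun]
        cases hdw : dw with
        | nil =>
          rw [pvTokenize_nil, pvStripTrail_single_digit c _ hc hall]
          simp [pvProj]
        | cons e dw' =>
          have hne : dw ≠ [] := by rw [hdw]; simp
          have hne2 : s'.dropWhile (fun y => PySem.Chars.isdigit y) ≠ [] := hdwdef ▸ hne
          have he : PySem.Chars.isdigit e = false := by
            have h2 := List.head_dropWhile_not (p := fun y => PySem.Chars.isdigit y) (l := s') (w := hne2)
            have h3 : (s'.dropWhile (fun y => PySem.Chars.isdigit y)).head hne2 = e := by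
              simp only [← hdwdef, hdw, List.head_cons]
            rwa [h3] at h2
          have hflush := pv_flush { st with digits := 1 + (tw.length : Int), num := c :: tw } e
            (pvStepB (pvProj st) (c :: tw)) rfl (by simp; omega) he (by simp [hc])
          have hlen : dw'.length ≤ n := by
            have h4 := congrArg List.length hsplit
            rw [hdw] at h4
            simp only [List.length_cons, List.length_append] at hs h4
            omega
          simp only [List.foldl_cons]
          rw [ih dw' hlen _ hflush.2, hflush.1, ← pv_T1 e he dw']
          rw [pvStripTrail_cons _ _ (pvTokenize_ne_nil e dw')]
          rw [List.foldl_cons]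
      · -- a non-digit character just extends the text
        have hcf : PySem.Chars.isdigit c = false := by simpa using hc
        have hstep : pvStepA st c = { st with text := st.text ++ [c] } := by
          simp [pvStepA, hcf, h0]
        simp only [List.foldl_cons, hstep]
        rw [ih s' (by simpa using hs) _ (by simp [h0])]
        rw [pv_T1 c hcf s']
        rfl

-- A's nested loop over lines is the character fold over the concatenation of the lines
theorem pv_lines (lines : List String) : ∀ (st : PvStA),
    lines.foldl (fun st line => line.toList.foldl pvStepA st) st
      = (lines.flatMap String.toList).foldl pvStepA st := by
  induction lines with
  | nil => intro st; simp
  | cons l ls ih => intro st; simp [List.foldl_append, ih]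

-- ===== VERDICT (by name: the statement is the Claim_ definition above) =====
theorem extract_book_v2_spec : Claim_equal_extract_book_v2 := by
  intro lines _
  unfold Spec_extract_book_v2 extract_book_v2 extract_book_v2_alt
  rw [pv_lines]
  have h := pv_main (lines.flatMap String.toList).length (lines.flatMap String.toList) le_rfl
    { book := [[]], chapters := [], chapter := 0, verse := 0, digits := 0, text := [], num := [] } rfl
  have hb := congrArg PvStB.book h
  have hch := congrArg PvStB.chapters h
  have ht := congrArg PvStB.text h
  simp only [pvProj] at hb hch ht
  simp only [hb, hch, ht]
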